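-- pv_equiv track=rewrite | github.com/rishika-nn/Capstone_Project | enhancements.py | _create_positive_pairs
-- ===== SOURCE A (Python) =====
-- from typing import List, Dict, Tuple, Optional
--
-- def _create_positive_pairs(captions: List[str]) -> List[Tuple[int, int]]:
--     """Create positive pairs based on caption similarity."""
--     positive_pairs = []
--
--     for i, caption1 in enumerate(captions):
--         for j, caption2 in enumerate(captions[i+1:], i+1):
--             # Simple similarity based on word overlap
--             words1 = set(caption1.lower().split())
--             words2 = set(caption2.lower().split())
--             overlap = len(words1.intersection(words2))
--
--             if overlap >= 2:  # At least 2 common words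
--                 positive_pairs.append((i, j))
--
--     return positive_pairs[:100]  # Limit number of pairs
-- ===== SOURCE B (Python) =====
-- from typing import List, Tuple
--
-- def _create_positive_pairs(captions: List[str]) -> List[Tuple[int, int]]:
--     """Create positive pairs via an inverted word index and co-occurrence counting."""
--     # posting lists: word -> ascending list of caption indices containing it
--     index = {}
--     for i, caption in enumerate(captions):
--         for word in dict.fromkeys(caption.lower().split()):  # distinct words
--             index.setdefault(word, []).append(i)
--     # every pair of captions sharing a word, once per shared word
--     shared = []
--     for posting in index.values():
--         for x in range(len(posting)):
--             for y in range(x + 1, len(posting)):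
--                 shared.append((posting[x], posting[y]))
--     counts = {}
--     for pair in shared:
--         counts[pair] = counts.get(pair, 0) + 1
--     pairs = sorted(pair for pair, c in counts.items() if c >= 2)
--     return pairs[:100]
-- ===== Notes on version B (the rewrite author's own statement) =====
-- stated objective: faster
-- what changed: Replaces the O(n^2) pairwise set-intersection scan (rebuilding both word sets for every pair) with an inverted word index whose posting lists are turned into per-shared-word co-occurrence counts; pairs with count >= 2 are then sorted and truncated to 100.
import Mathlib
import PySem

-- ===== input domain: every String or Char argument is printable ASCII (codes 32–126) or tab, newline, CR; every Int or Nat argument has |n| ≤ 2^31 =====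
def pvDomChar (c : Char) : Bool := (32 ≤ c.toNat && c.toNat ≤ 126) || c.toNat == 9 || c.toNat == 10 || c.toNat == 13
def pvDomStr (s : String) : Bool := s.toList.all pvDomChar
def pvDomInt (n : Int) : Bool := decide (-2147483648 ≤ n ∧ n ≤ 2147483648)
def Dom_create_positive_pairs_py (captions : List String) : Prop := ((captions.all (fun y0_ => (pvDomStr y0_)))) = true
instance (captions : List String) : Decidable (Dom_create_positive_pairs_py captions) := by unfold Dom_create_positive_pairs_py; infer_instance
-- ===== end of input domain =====

-- B replaces the pairwise set-intersection scan with an inverted word index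
-- and per-shared-word co-occurrence counting; same return value, proved below.

-- ===== PORT A =====
def create_positive_pairs_py (captions : List String) : List (Int × Int) :=
  let positive_pairs : List (Int × Int) :=
    (PySem.List.enumerate captions).foldl (fun acc ic =>
      (PySem.List.enumerate (PySem.List.slice captions (some (ic.1 + 1)) none) (ic.1 + 1)).foldl
        (fun acc jc =>
          let words1 := PySem.Set.ofList (PySem.Str.split₀ (PySem.Str.lower ic.2))
          let words2 := PySem.Set.ofList (PySem.Str.split₀ (PySem.Str.lower jc.2))
          let overlap := PySem.Set.len (PySem.Set.inter words1 words2)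
          if 2 ≤ overlap then acc ++ [(ic.1, jc.1)] else acc)
        acc)
      []
  PySem.List.slice positive_pairs none (some 100)

-- ===== PORT B =====
def create_positive_pairs_py_alt (captions : List String) : List (Int × Int) :=
  let index : PySem.Dict String (List Int) :=
    (PySem.List.enumerate captions).foldl (fun d ic =>
      (PySem.List.dedup (PySem.Str.split₀ (PySem.Str.lower ic.2))).foldl
        (fun d word => d.insert word (d.getD word [] ++ [ic.1])) d)
      PySem.Dict.empty
  let shared : List (Int × Int) :=
    index.values.foldl (fun acc posting =>
      (PySem.List.pyRange 0 posting.length 1).foldl (fun acc x =>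
        (PySem.List.pyRange (x + 1) posting.length 1).foldl (fun acc y =>
          acc ++ [(PySem.List.pyGetD posting x 0, PySem.List.pyGetD posting y 0)])
          acc)
        acc)
      []
  let counts : PySem.Dict (Int × Int) Int :=
    shared.foldl (fun d pair => d.insert pair (d.getD pair 0 + 1)) PySem.Dict.empty
  let pairs : List (Int × Int) :=
    PySem.List.sorted2 ((counts.items.filter (fun pc => 2 ≤ pc.2)).map (·.1)) (·.1) (·.2)
  PySem.List.slice pairs none (some 100)

-- ===== PRECONDITION & SPEC =====
def Spec_create_positive_pairs_py (captions : List String) (out : List (Int × Int)) : Prop := out = create_positive_pairs_py_alt captions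
instance (captions : List String) (out : List (Int × Int)) : Decidable (Spec_create_positive_pairs_py captions out) := by unfold Spec_create_positive_pairs_py; infer_instance

-- ===== CLAIM (what is proved, stated in full; the proofs are below) =====
def Claim_equal_create_positive_pairs_py : Prop := ∀ (captions : List String), Dom_create_positive_pairs_py captions → Spec_create_positive_pairs_py captions (create_positive_pairs_py captions)

-- ===== LEMMAS AND PROOFS =====

-- proof-side abbreviations
def pvWlist (c : String) : List String := PySem.Str.split₀ (PySem.Str.lower c)

def pvOv (c1 c2 : String) : Int :=
  PySem.Set.len (PySem.Set.inter (PySem.Set.ofList (pvWlist c1)) (PySem.Set.ofList (pvWlist c2)))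

def pvP (captions : List String) (p : Int × Int) : Bool :=
  decide (2 ≤ pvOv (PySem.List.pyGetD captions p.1 "") (PySem.List.pyGetD captions p.2 ""))

-- all pairs (a,b), 0 ≤ a < b < |captions|, in lexicographic order
def pvLex (captions : List String) : List (Int × Int) :=
  (PySem.List.pyRange 0 captions.length 1).flatMap (fun a =>
    (PySem.List.pyRange (a + 1) captions.length 1).map (fun b => (a, b)))

-- the common canonical value both ports are reduced to (before the [:100] slice)
def pvC (captions : List String) : List (Int × Int) := (pvLex captions).filter (pvP captions)

-- B-side abbreviations
def pvIndex (captions : List String) : PySem.Dict String (List Int) :=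
  (PySem.List.enumerate captions).foldl (fun d ic =>
    (PySem.List.dedup (pvWlist ic.2)).foldl
      (fun d word => d.insert word (d.getD word [] ++ [ic.1])) d) PySem.Dict.empty

def pvPost (captions : List String) (w : String) : List Int :=
  ((PySem.List.enumerate captions).filter (fun ic => (pvWlist ic.2).contains w)).map (·.1)

def pairsOf (p : List Int) : List (Int × Int) :=
  (PySem.List.pyRange 0 p.length 1).flatMap (fun x =>
    (PySem.List.pyRange (x + 1) p.length 1).map (fun y =>
      (PySem.List.pyGetD p x 0, PySem.List.pyGetD p y 0)))

def allPairs : List Int → List (Int × Int)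
  | [] => []
  | x :: t => t.map (fun y => (x, y)) ++ allPairs t

def pvShared (captions : List String) : List (Int × Int) :=
  (pvIndex captions).values.flatMap pairsOf

def pvCand (captions : List String) : List (Int × Int) :=
  (PySem.Set.ofList (pvShared captions)).filter
    (fun k => decide (2 ≤ ((pvShared captions).count k : Int)))

-- generic lemmas
lemma foldl_ite_append {α β : Type} (p : α → Prop) [DecidablePred p] (f : α → β)
    (l : List α) (acc : List β) :
    l.foldl (fun acc x => if p x then acc ++ [f x] else acc) acc
      = acc ++ (l.filter (fun x => decide (p x))).map f := by
  induction l generalizing acc with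
  | nil => simp
  | cons x t ih =>
    by_cases h : p x <;> simp [h, ih]

lemma sum_map_ite {α : Type} (q : α → Prop) [DecidablePred q] (l : List α) :
    (l.map (fun w => if q w then (1 : Nat) else 0)).sum
      = (l.filter (fun w => decide (q w))).length := by
  induction l with
  | nil => simp
  | cons x t ih =>
    by_cases h : q x <;> simp [h, ih] <;> omega

lemma pyGetD_cons_shift {α : Type} (x : α) (t : List α) (d : α) (j s : Int)
    (h1 : s + 1 ≤ j) (h2 : j < s + 1 + t.length) :
    PySem.List.pyGetD t (j - (s + 1)) d = PySem.List.pyGetD (x :: t) (j - s) d := by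
  have hm : j - (s + 1) = ((j - (s + 1)).toNat : Int) := by omega
  have hm1 : j - s = (((j - (s + 1)).toNat + 1 : Nat) : Int) := by omega
  rw [hm, hm1, PySem.List.pyGetD_natCast, PySem.List.pyGetD_natCast]
  rfl

lemma enum_drop {α : Type} (xs : List α) (k : Nat) (s : Int) (d : α) :
    PySem.List.enumerate (xs.drop k) (s + k)
      = (PySem.List.pyRange (s + k) (s + xs.length) 1).map
          (fun j => (j, PySem.List.pyGetD xs (j - s) d)) := by
  induction xs generalizing k s with
  | nil =>
    simp only [List.drop_nil, PySem.List.enumerate_nil, List.length_nil, Nat.cast_zero, add_zero]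
    rw [PySem.List.pyRange_one_eq_nil (by omega)]
    simp
  | cons x t ih =>
    cases k with
    | zero =>
      simp only [List.drop_zero, Nat.cast_zero, add_zero, List.length_cons, Nat.cast_add,
        Nat.cast_one]
      rw [PySem.List.enumerate_cons,
        show PySem.List.enumerate t (s + 1) = PySem.List.enumerate (t.drop 0) ((s + 1) + ((0:Nat):Int)) by norm_num,
        ih,
        show PySem.List.pyRange s (s + (↑t.length + 1)) 1
            = s :: PySem.List.pyRange (s + 1) (s + (↑t.length + 1)) 1 from
          PySem.List.pyRange_one_cons (by omega)]
      simp only [List.map_cons]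
      congr 1
      · have h0 : s - s = ((0:Nat) : Int) := by omega
        rw [h0, PySem.List.pyGetD_natCast]
        rfl
      · rw [show (s + 1 + ((0:Nat):Int)) = s + 1 by norm_num,
          show (s + 1 + (t.length:Int)) = s + (↑t.length + 1) by ring]
        apply List.map_congr_left
        intro j hj
        rw [PySem.List.mem_pyRange_one] at hj
        rw [pyGetD_cons_shift x t d j s (by omega) (by omega)]
    | succ m =>
      have hd : (x :: t).drop (m + 1) = t.drop m := by simp
      rw [hd, show s + ((m + 1 : Nat) : Int) = (s + 1) + ((m : Nat) : Int) by push_cast; ring, ih]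
      rw [show ((s + 1) + (t.length : Int)) = s + (((x :: t).length : Nat) : Int) by simp; ring]
      apply List.map_congr_left
      intro j hj
      rw [PySem.List.mem_pyRange_one] at hj
      have hlen : (((x :: t).length : Nat) : Int) = ↑t.length + 1 := by simp
      rw [pyGetD_cons_shift x t d j s (by omega) (by omega)]

-- ===== A side =====
set_option maxHeartbeats 1600000 in
lemma A_eq_C (captions : List String) :
    create_positive_pairs_py captions = PySem.List.slice (pvC captions) none (some 100) := by
  have hfold : ∀ (l : List (Int × String)) (acc : List (Int × Int)),
      l.foldl (fun acc ic =>
        (PySem.List.enumerate (PySem.List.slice captions (some (ic.1 + 1)) none)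
            (ic.1 + 1)).foldl
          (fun acc jc =>
            if 2 ≤ PySem.Set.len (PySem.Set.inter
                (PySem.Set.ofList (PySem.Str.split₀ (PySem.Str.lower ic.2)))
                (PySem.Set.ofList (PySem.Str.split₀ (PySem.Str.lower jc.2))))
            then acc ++ [(ic.1, jc.1)] else acc) acc) acc
      = acc ++ l.flatMap (fun ic =>
          ((PySem.List.enumerate (PySem.List.slice captions (some (ic.1 + 1)) none)
              (ic.1 + 1)).filter
            (fun jc => decide (2 ≤ PySem.Set.len (PySem.Set.inter
                (PySem.Set.ofList (PySem.Str.split₀ (PySem.Str.lower ic.2)))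
                (PySem.Set.ofList (PySem.Str.split₀ (PySem.Str.lower jc.2))))))).map
            (fun jc => (ic.1, jc.1))) := by
    intro l
    induction l with
    | nil => simp
    | cons ic t ih =>
      intro acc
      rw [List.foldl_cons, ih, List.flatMap_cons, ← List.append_assoc]
      congr 1
      exact foldl_ite_append _ _ _ _
  simp only [create_positive_pairs_py]
  rw [hfold]
  rw [List.nil_append]
  congr 1
  rw [PySem.List.enumerate_eq_map_pyRange captions "", List.flatMap_map]
  rw [pvC, pvLex, List.filter_flatMap]
  simp only [PySem.List.len_eq]
  rw [List.flatMap_def, List.flatMap_def]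
  congr 1
  apply List.map_congr_left
  intro a ha
  rw [PySem.List.mem_pyRange_one] at ha
  have hk : (((a + 1).toNat : Nat) : Int) = a + 1 := by omega
  have hslice : PySem.List.slice captions (some (a + 1)) none = captions.drop (a + 1).toNat :=
    PySem.List.slice_from captions (by omega)
  have henum : PySem.List.enumerate (captions.drop (a + 1).toNat) (a + 1)
      = (PySem.List.pyRange (a + 1) (captions.length : Int) 1).map
          (fun j => (j, PySem.List.pyGetD captions j "")) := by
    have := enum_drop captions (a + 1).toNat 0 ""
    rw [hk] at this
    simpa using this
  simp only [hslice, henum, List.filter_map, List.map_map]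
  simp [pvP, pvOv, pvWlist, Function.comp_def]

-- ===== B side =====

lemma pyRange_nat_nat (a b : Nat) :
    PySem.List.pyRange a b 1 = (List.range (b - a)).map (fun k => ((a + k : Nat) : Int)) := by
  rw [PySem.List.pyRange_one]
  rw [show (((b:Nat):Int) - ((a:Nat):Int)).toNat = b - a by omega]
  apply List.map_congr_left
  intro k _
  push_cast
  ring

lemma map_getD_range {α : Type} (t : List α) (d : α) :
    (List.range t.length).map (fun k => t.getD k d) = t := by
  apply List.ext_getElem
  · simp
  · intro i h1 h2
    simp [List.getD_eq_getElem?_getD, List.getElem?_eq_getElem h2]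

def natPairs (p : List Int) : List (Int × Int) :=
  (List.range p.length).flatMap (fun x =>
    (List.range (p.length - (x + 1))).map (fun k => (p.getD x 0, p.getD (x + 1 + k) 0)))

lemma foldl_append_singleton {α β : Type} (f : α → β) (l : List α) (acc : List β) :
    l.foldl (fun acc y => acc ++ [f y]) acc = acc ++ l.map f := by
  induction l generalizing acc with
  | nil => simp
  | cons x t ih => simp [ih]

lemma getD_word_fold_of_not_mem (l : List String) (i : Int)
    (d : PySem.Dict String (List Int)) (w : String) (hw : w ∉ l) :
    (l.foldl (fun d word => d.insert word (d.getD word [] ++ [i])) d).getD w []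
      = d.getD w [] := by
  induction l generalizing d with
  | nil => rfl
  | cons x t ih =>
    simp only [List.mem_cons, not_or] at hw
    simp only [List.foldl_cons]
    rw [ih _ hw.2, PySem.Dict.getD_insert_of_ne _ _ _ hw.1]

lemma getD_word_fold (l : List String) (i : Int)
    (d : PySem.Dict String (List Int)) (w : String) (hl : l.Nodup) :
    (l.foldl (fun d word => d.insert word (d.getD word [] ++ [i])) d).getD w []
      = if w ∈ l then d.getD w [] ++ [i] else d.getD w [] := by
  induction l generalizing d with
  | nil => simp
  | cons x t ih =>
    simp only [List.nodup_cons] at hl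
    simp only [List.foldl_cons]
    by_cases hwx : w = x
    · subst hwx
      rw [getD_word_fold_of_not_mem _ _ _ _ hl.1, PySem.Dict.getD_insert_self]
      simp
    · rw [ih _ hl.2]
      by_cases hwt : w ∈ t <;>
        simp [hwt, hwx, PySem.Dict.getD_insert_of_ne _ _ _ hwx]

lemma getD_build (l : List (Int × String))
    (d : PySem.Dict String (List Int)) (w : String) :
    (l.foldl (fun d ic => (PySem.List.dedup (pvWlist ic.2)).foldl
        (fun d word => d.insert word (d.getD word [] ++ [ic.1])) d) d).getD w []
      = d.getD w [] ++ (l.filter (fun ic => (pvWlist ic.2).contains w)).map (·.1) := by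
  induction l generalizing d with
  | nil => simp
  | cons ic t ih =>
    rw [List.foldl_cons, ih, getD_word_fold _ _ _ _ (PySem.List.nodup_dedup _)]
    by_cases h : w ∈ pvWlist ic.2
    · simp [List.filter_cons, h, PySem.List.mem_dedup]
    · simp [List.filter_cons, h, PySem.List.mem_dedup]

lemma getD_pvIndex (captions : List String) (w : String) :
    (pvIndex captions).getD w [] = pvPost captions w := by
  rw [pvIndex, getD_build]
  simp [pvPost]

lemma keys_build (l : List (Int × String))
    (d : PySem.Dict String (List Int)) :
    (l.foldl (fun d ic => (PySem.List.dedup (pvWlist ic.2)).foldl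
        (fun d word => d.insert word (d.getD word [] ++ [ic.1])) d) d).keys
      = PySem.Set.update d.keys (l.flatMap (fun ic => PySem.List.dedup (pvWlist ic.2))) := by
  induction l generalizing d with
  | nil => simp [PySem.Set.update]
  | cons ic t ih =>
    rw [List.foldl_cons, ih, PySem.Dict.keys_foldl_insert, List.flatMap_cons]
    rw [PySem.Set.update, PySem.Set.update, PySem.Set.update, List.foldl_append]

lemma nodup_keys_pvIndex (captions : List String) : (pvIndex captions).keys.Nodup := by
  rw [pvIndex, keys_build]
  rw [PySem.Dict.keys_empty, show ([] : List String) = PySem.Set.empty from rfl,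
    PySem.Set.update_empty]
  exact PySem.Set.nodup_ofList _

lemma mem_keys_pvIndex (captions : List String) (w : String) :
    w ∈ (pvIndex captions).keys ↔
      ∃ ic ∈ PySem.List.enumerate captions 0, w ∈ pvWlist ic.2 := by
  rw [pvIndex, keys_build]
  rw [PySem.Dict.keys_empty, show ([] : List String) = PySem.Set.empty from rfl,
    PySem.Set.update_empty]
  simp [PySem.Set.mem_ofList, List.mem_flatMap, PySem.List.mem_dedup]

lemma pairsOf_eq_natPairs (p : List Int) : pairsOf p = natPairs p := by
  rw [pairsOf, natPairs, PySem.List.pyRange_zero_nat, List.flatMap_map,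
    List.flatMap_def, List.flatMap_def]
  congr 1
  apply List.map_congr_left
  intro x _
  rw [show ((x : Nat) : Int) + 1 = ((x + 1 : Nat) : Int) by push_cast; ring]
  rw [pyRange_nat_nat (x + 1) p.length, List.map_map]
  apply List.map_congr_left
  intro k _
  simp only [Function.comp]
  rw [PySem.List.pyGetD_natCast, PySem.List.pyGetD_natCast]

lemma natPairs_eq_allPairs (p : List Int) : natPairs p = allPairs p := by
  induction p with
  | nil => simp [natPairs, allPairs]
  | cons z t ih =>
    rw [natPairs, allPairs, ← ih, natPairs]
    simp only [List.length_cons]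
    rw [List.range_succ_eq_map, List.flatMap_cons, List.flatMap_map]
    congr 1
    · conv_rhs => rw [← map_getD_range t 0, List.map_map]
      simp only [Nat.add_sub_cancel, List.length_map, List.length_range]
      apply List.map_congr_left
      intro k _
      rw [show 0 + 1 + k = k + 1 by omega]
      simp [Function.comp]
    · rw [List.flatMap_def, List.flatMap_def]
      congr 1
      apply List.map_congr_left
      intro x _
      rw [show t.length + 1 - (Nat.succ x + 1) = t.length - (x + 1) by omega]
      apply List.map_congr_left
      intro k _
      rw [show Nat.succ x = x + 1 from rfl]
      rw [show x + 1 + 1 + k = (x + 1 + k) + 1 by omega]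
      simp [List.getD_cons_succ]

lemma pairsOf_eq_allPairs (p : List Int) : pairsOf p = allPairs p := by
  rw [pairsOf_eq_natPairs, natPairs_eq_allPairs]

lemma shared_eq (captions : List String) :
    pvShared captions
      = (pvIndex captions).keys.flatMap (fun w => allPairs (pvPost captions w)) := by
  rw [pvShared]
  have hv : (pvIndex captions).values
      = (pvIndex captions).keys.map (fun w => (pvIndex captions).getD w []) := by
    show (pvIndex captions).items.map (·.2) = _
    rw [PySem.Dict.items_eq_map_keys (pvIndex captions) (nodup_keys_pvIndex captions) [],
      List.map_map]
    rfl
  rw [hv, List.flatMap_map]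
  apply List.flatMap_congr
  intro w _
  show pairsOf ((pvIndex captions).getD w []) = _
  rw [getD_pvIndex, pairsOf_eq_allPairs]

lemma count_allPairs (p : List Int) (hp : p.Pairwise (· < ·)) (a b : Int) :
    (allPairs p).count (a, b) = if a ∈ p ∧ b ∈ p ∧ a < b then 1 else 0 := by
  induction p with
  | nil => simp [allPairs]
  | cons x t ih =>
    rw [List.pairwise_cons] at hp
    have hnodup : t.Nodup := hp.2.imp (fun h => ne_of_lt h)
    have hinj : Function.Injective (fun y : Int => ((x : Int), y)) := by
      intro y1 y2 h
      simpa using h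
    have hmapcount : (t.map (fun y => (x, y))).count (a, b)
        = if x = a ∧ b ∈ t then 1 else 0 := by
      by_cases hxa : x = a
      · subst hxa
        rw [show ((x, b) : Int × Int) = (fun y : Int => ((x:Int), y)) b from rfl,
          List.count_map_of_injective t _ hinj b]
        by_cases hbt : b ∈ t
        · simp [hbt, List.count_eq_one_of_mem hnodup hbt]
        · simp [hbt, List.count_eq_zero.mpr hbt]
      · rw [List.count_eq_zero.mpr (by simp; intro _; exact hxa)]
        simp [hxa]
    rw [allPairs, List.count_append, hmapcount, ih hp.2]
    by_cases hxa : x = a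
    · subst hxa
      have hxt : x ∉ t := fun h => lt_irrefl x (hp.1 x h)
      by_cases hbt : b ∈ t
      · have hlt : x < b := hp.1 b hbt
        simp [hxt, hbt, hlt, List.mem_cons]
      · have hrhs : ¬(x ∈ x :: t ∧ b ∈ x :: t ∧ x < b) := by
          rintro ⟨-, hb, hlt⟩
          rcases List.mem_cons.mp hb with rfl | h
          · exact lt_irrefl _ hlt
          · exact hbt h
        simp [hxt, hbt, hrhs]
        intro h
        omega
    · have key : (a ∈ x :: t ∧ b ∈ x :: t ∧ a < b) ↔ (a ∈ t ∧ b ∈ t ∧ a < b) := by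
        constructor
        · rintro ⟨ha, hb, hlt⟩
          rcases List.mem_cons.mp ha with rfl | ha'
          · exact absurd rfl (Ne.symm hxa)
          rcases List.mem_cons.mp hb with rfl | hb'
          · have := hp.1 a ha'
            omega
          · exact ⟨ha', hb', hlt⟩
        · rintro ⟨ha, hb, hlt⟩
          exact ⟨List.mem_cons_of_mem _ ha, List.mem_cons_of_mem _ hb, hlt⟩
      rw [if_neg (fun h => hxa h.1), zero_add, if_congr key rfl rfl]

lemma pairwise_pvPost (captions : List String) (w : String) :
    (pvPost captions w).Pairwise (· < ·) := by
  rw [pvPost, List.pairwise_map]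
  exact (PySem.List.pairwise_lt_enumerate captions 0).filter _

lemma mem_pvPost (captions : List String) (w : String) (a : Int) :
    a ∈ pvPost captions w ↔
      0 ≤ a ∧ a < captions.length ∧ w ∈ pvWlist (PySem.List.pyGetD captions a "") := by
  rw [pvPost]
  simp only [List.mem_map, List.mem_filter]
  constructor
  · rintro ⟨ic, ⟨hmem, hcont⟩, rfl⟩
    rw [PySem.List.mem_enumerate_iff] at hmem
    obtain ⟨k, hk, rfl⟩ := hmem
    rw [List.contains_iff_mem] at hcont
    refine ⟨by omega, by simp; omega, ?_⟩
    rw [show ((0:Int) + (k:Nat), captions[k]).1 = ((k : Nat) : Int) by simp,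
      PySem.List.pyGetD_natCast, List.getD_eq_getElem?_getD, List.getElem?_eq_getElem hk]
    simpa using hcont
  · rintro ⟨h0, hlen, hw⟩
    have hk : a.toNat < captions.length := by omega
    refine ⟨(a, captions[a.toNat]), ⟨?_, ?_⟩, rfl⟩
    · rw [PySem.List.mem_enumerate_iff]
      exact ⟨a.toNat, hk, by simp; omega⟩
    · rw [List.contains_iff_mem]
      rw [show a = ((a.toNat : Nat) : Int) by omega, PySem.List.pyGetD_natCast,
        List.getD_eq_getElem?_getD, List.getElem?_eq_getElem hk] at hw
      simpa using hw

lemma pygetd_mem_enumerate (captions : List String) (a : Int)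
    (h0 : 0 ≤ a) (h : a < captions.length) :
    (a, PySem.List.pyGetD captions a "") ∈ PySem.List.enumerate captions 0 := by
  have hk : a.toNat < captions.length := by omega
  have h1 : PySem.List.pyGetD captions a "" = captions[a.toNat] := by
    have h2 := PySem.List.pyGetD_natCast captions a.toNat ""
    rw [show ((a.toNat : Nat) : Int) = a by omega] at h2
    rw [h2, List.getD_eq_getElem?_getD, List.getElem?_eq_getElem hk]
    rfl
  rw [PySem.List.mem_enumerate_iff]
  exact ⟨a.toNat, hk, by simp [Prod.ext_iff, h1]; omega⟩

lemma count_pvShared (captions : List String) (a b : Int)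
    (ha : 0 ≤ a) (hab : a < b) (hb : b < captions.length) :
    ((pvShared captions).count (a, b) : Int)
      = pvOv (PySem.List.pyGetD captions a "") (PySem.List.pyGetD captions b "") := by
  rw [shared_eq, List.count_flatMap]
  have h1 : ((pvIndex captions).keys.map
        (List.count (a, b) ∘ fun w => allPairs (pvPost captions w)))
      = (pvIndex captions).keys.map (fun w =>
          if a ∈ pvPost captions w ∧ b ∈ pvPost captions w ∧ a < b then 1 else 0) := by
    apply List.map_congr_left
    intro w _
    simp only [Function.comp]
    exact count_allPairs _ (pairwise_pvPost captions w) a b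
  rw [h1, sum_map_ite]
  have hperm : ((pvIndex captions).keys.filter
        (fun w => decide (a ∈ pvPost captions w ∧ b ∈ pvPost captions w ∧ a < b))).Perm
      (PySem.Set.inter (PySem.Set.ofList (pvWlist (PySem.List.pyGetD captions a "")))
        (PySem.Set.ofList (pvWlist (PySem.List.pyGetD captions b "")))) := by
    rw [List.perm_ext_iff_of_nodup ((nodup_keys_pvIndex captions).filter _)
      (PySem.Set.nodup_inter _ _ (PySem.Set.nodup_ofList _))]
    intro w
    rw [List.mem_filter, PySem.Set.mem_inter, PySem.Set.mem_ofList, PySem.Set.mem_ofList]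
    constructor
    · rintro ⟨_, hcond⟩
      rw [decide_eq_true_eq] at hcond
      obtain ⟨hma, hmb, -⟩ := hcond
      rw [mem_pvPost] at hma hmb
      exact ⟨hma.2.2, hmb.2.2⟩
    · rintro ⟨hwa, hwb⟩
      refine ⟨?_, ?_⟩
      · rw [mem_keys_pvIndex]
        exact ⟨(a, PySem.List.pyGetD captions a ""),
          pygetd_mem_enumerate captions a ha (by omega), hwa⟩
      · rw [decide_eq_true_eq]
        exact ⟨(mem_pvPost captions w a).mpr ⟨ha, by omega, hwa⟩,
          (mem_pvPost captions w b).mpr ⟨by omega, hb, hwb⟩, hab⟩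
  rw [hperm.length_eq, pvOv, PySem.Set.len]

lemma mem_pvShared (captions : List String) (p : Int × Int) (hp : p ∈ pvShared captions) :
    0 ≤ p.1 ∧ p.1 < p.2 ∧ p.2 < captions.length := by
  rw [shared_eq, List.mem_flatMap] at hp
  obtain ⟨w, _, hpw⟩ := hp
  have hcount := count_allPairs (pvPost captions w) (pairwise_pvPost captions w) p.1 p.2
  have hpos : 0 < (allPairs (pvPost captions w)).count (p.1, p.2) := by
    rw [List.count_pos_iff, Prod.mk.eta]
    exact hpw
  rw [hcount] at hpos
  by_cases h : p.1 ∈ pvPost captions w ∧ p.2 ∈ pvPost captions w ∧ p.1 < p.2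
  · obtain ⟨h1, h2, h3⟩ := h
    rw [mem_pvPost] at h1 h2
    exact ⟨h1.1, h3, h2.2.1⟩
  · rw [if_neg h] at hpos
    omega

lemma mem_pvLex (captions : List String) (p : Int × Int) :
    p ∈ pvLex captions ↔ 0 ≤ p.1 ∧ p.1 < p.2 ∧ p.2 < captions.length := by
  rw [pvLex]
  simp only [List.mem_flatMap, List.mem_map, PySem.List.mem_pyRange_one]
  constructor
  · rintro ⟨a, ⟨h0, hn⟩, b, ⟨hab, hbn⟩, rfl⟩
    exact ⟨h0, by omega, hbn⟩
  · rintro ⟨h0, hab, hbn⟩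
    exact ⟨p.1, ⟨h0, by omega⟩, p.2, ⟨by omega, hbn⟩, Prod.mk.eta⟩

lemma pairwise_pvLex (captions : List String) :
    (pvLex captions).Pairwise (fun p q => p.1 < q.1 ∨ (p.1 = q.1 ∧ p.2 < q.2)) := by
  rw [pvLex, List.flatMap_def, List.pairwise_flatten]
  constructor
  · intro l hl
    rw [List.mem_map] at hl
    obtain ⟨a, _, rfl⟩ := hl
    rw [List.pairwise_map]
    exact (PySem.List.pairwise_lt_pyRange_one _ _).imp (fun h => Or.inr ⟨rfl, h⟩)
  · rw [List.pairwise_map]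
    apply (PySem.List.pairwise_lt_pyRange_one _ _).imp
    intro a1 a2 h12 x hx y hy
    rw [List.mem_map] at hx hy
    obtain ⟨b1, _, rfl⟩ := hx
    obtain ⟨b2, _, rfl⟩ := hy
    exact Or.inl h12

lemma nodup_pvC (captions : List String) : (pvC captions).Nodup := by
  rw [pvC]
  refine List.Nodup.filter _ ?_
  exact (pairwise_pvLex captions).imp
    (fun h => by rintro rfl; rcases h with h | ⟨-, h⟩ <;> exact lt_irrefl _ h)

lemma cand_perm_C (captions : List String) : (pvCand captions).Perm (pvC captions) := by
  have hnd1 : (pvCand captions).Nodup := by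
    rw [pvCand]
    exact List.Nodup.filter _ (PySem.Set.nodup_ofList _)
  rw [List.perm_ext_iff_of_nodup hnd1 (nodup_pvC captions)]
  intro p
  rw [pvCand, List.mem_filter, PySem.Set.mem_ofList, pvC, List.mem_filter, mem_pvLex]
  constructor
  · rintro ⟨hmem, hc⟩
    rw [decide_eq_true_eq] at hc
    have hbounds := mem_pvShared captions p hmem
    have hcount := count_pvShared captions p.1 p.2 hbounds.1 hbounds.2.1 hbounds.2.2
    refine ⟨hbounds, ?_⟩
    rw [pvP, decide_eq_true_eq, ← hcount, Prod.mk.eta]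
    exact hc
  · rintro ⟨⟨h1, h2, h3⟩, hP⟩
    have hcount := count_pvShared captions p.1 p.2 h1 h2 h3
    rw [pvP, decide_eq_true_eq] at hP
    have h2c : (2 : Int) ≤ ((pvShared captions).count (p.1, p.2) : Int) := by
      rw [hcount]
      exact hP
    have hmem : p ∈ pvShared captions := by
      rw [← Prod.mk.eta (p := p), ← List.count_pos_iff]
      omega
    refine ⟨hmem, ?_⟩
    rw [decide_eq_true_eq]
    rw [← Prod.mk.eta (p := p)] at h2c ⊢
    exact h2c

lemma sorted2_eq_sorted_lex (xs : List (Int × Int)) :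
    PySem.List.sorted2 xs (·.1) (·.2)
      = PySem.List.sorted xs (fun p => (toLex p : Lex (Int × Int))) := by
  show xs.foldl (fun acc x => PySem.List.insertBy
      (fun a b => decide (a.1 < b.1) || (!decide (b.1 < a.1) && decide (a.2 < b.2))) x acc) []
    = xs.foldl (fun acc x => PySem.List.insertBy
      (fun a b => decide ((toLex a : Lex (Int × Int)) < toLex b)) x acc) []
  have hb : (fun (a b : Int × Int) =>
        decide (a.1 < b.1) || (!decide (b.1 < a.1) && decide (a.2 < b.2)))
      = (fun (a b : Int × Int) => decide ((toLex a : Lex (Int × Int)) < toLex b)) := by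
    funext a b
    have hlex : ((toLex a : Lex (Int × Int)) < toLex b)
        ↔ (a.1 < b.1 ∨ (a.1 = b.1 ∧ a.2 < b.2)) := Prod.Lex.lt_iff
    by_cases h1 : a.1 < b.1 <;> by_cases h2 : b.1 < a.1 <;> by_cases h3 : a.2 < b.2 <;>
      simp [h1, h2, h3, hlex] <;> omega
  rw [hb]

lemma B_eq_C (captions : List String) :
    create_positive_pairs_py_alt captions = PySem.List.slice (pvC captions) none (some 100) := by
  have hmid : ∀ (posting : List Int) (r : List Int) (acc : List (Int × Int)),
      r.foldl (fun acc x =>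
        (PySem.List.pyRange (x + 1) posting.length 1).foldl (fun acc y =>
          acc ++ [(PySem.List.pyGetD posting x 0, PySem.List.pyGetD posting y 0)]) acc) acc
      = acc ++ r.flatMap (fun x =>
          (PySem.List.pyRange (x + 1) posting.length 1).map (fun y =>
            (PySem.List.pyGetD posting x 0, PySem.List.pyGetD posting y 0))) := by
    intro posting r
    induction r with
    | nil => simp
    | cons z rt ih =>
      intro acc
      rw [List.foldl_cons, foldl_append_singleton, ih, List.flatMap_cons, List.append_assoc]
  have hshared : ∀ (vals : List (List Int)) (acc : List (Int × Int)),
      vals.foldl (fun acc posting =>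
        (PySem.List.pyRange 0 posting.length 1).foldl (fun acc x =>
          (PySem.List.pyRange (x + 1) posting.length 1).foldl (fun acc y =>
            acc ++ [(PySem.List.pyGetD posting x 0, PySem.List.pyGetD posting y 0)]) acc) acc) acc
      = acc ++ vals.flatMap pairsOf := by
    intro vals
    induction vals with
    | nil => simp
    | cons posting vt ih =>
      intro acc
      rw [List.foldl_cons, hmid, ih, List.flatMap_cons, List.append_assoc, pairsOf]
  simp only [create_positive_pairs_py_alt]
  rw [show ((PySem.List.enumerate captions).foldl (fun d ic =>
      (PySem.List.dedup (PySem.Str.split₀ (PySem.Str.lower ic.2))).foldl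
        (fun d word => d.insert word (d.getD word [] ++ [ic.1])) d) PySem.Dict.empty)
      = pvIndex captions from rfl]
  rw [hshared _ []]
  rw [List.nil_append,
    show (pvIndex captions).values.flatMap pairsOf = pvShared captions from rfl]
  rw [PySem.Dict.foldl_insert_getD_add_one_eq_counter, PySem.Dict.items_counter]
  rw [List.filter_map, List.map_map]
  rw [show ((fun pc : (Int × Int) × Int => decide (2 ≤ pc.2))
        ∘ (fun k => (k, (List.count k (pvShared captions) : Int))))
      = (fun k => decide (2 ≤ ((pvShared captions).count k : Int))) from rfl]
  rw [show ((fun pc : (Int × Int) × Int => pc.1)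
        ∘ (fun k => (k, (List.count k (pvShared captions) : Int))))
      = (fun k : Int × Int => k) from rfl]
  rw [List.map_id']
  rw [show ((PySem.Set.ofList (pvShared captions)).filter
        (fun k => decide (2 ≤ ((pvShared captions).count k : Int))))
      = pvCand captions from rfl]
  rw [sorted2_eq_sorted_lex]
  have hpair : (pvC captions).Pairwise
      (fun p q => (toLex p : Lex (Int × Int)) < toLex q) := by
    refine (List.Pairwise.filter _ (pairwise_pvLex captions)).imp ?_
    intro p q h
    rw [Prod.Lex.lt_iff]
    simpa using h
  rw [PySem.List.sorted_eq_of_perm_of_pairwise_lt (pvCand captions) (pvC captions)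
    (fun p => (toLex p : Lex (Int × Int))) (cand_perm_C captions).symm hpair]

-- ===== VERDICT (by name: the statement is the Claim_ definition above) =====
theorem create_positive_pairs_py_spec : Claim_equal_create_positive_pairs_py := by
  intro captions _
  unfold Spec_create_positive_pairs_py
  rw [A_eq_C, B_eq_C]
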